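-- pv_equiv track=rewrite | github.com/ResDT/Codeforces | Competitions/Codeforces Round 862 (Div. 2)/A.py | find_x
-- ===== SOURCE A (Python) =====
-- def find_x(n, a):
--     for x in range(28):
--         b = [a_i ^ x for a_i in a]
--         xor_sum = 0
--
--         for b_i in b:
--             if b_i < 0 or b_i > 27:
--                 break
--
--             xor_sum ^= b_i
--         else:
--             if not xor_sum:
--                 return x
--
--     return -1
-- ===== SOURCE B (Python) =====
-- def find_x(n, a):
--     total = 0
--     for ai in a:
--         total ^= ai
--     if len(a) % 2 == 1:
--         # xor of (ai ^ x) over odd-length a is total ^ x, so x = total is the only candidate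
--         x = total
--         if 0 <= x <= 27 and all(0 <= ai ^ x <= 27 for ai in a):
--             return x
--         return -1
--     # even length: xor of (ai ^ x) is total for every x
--     if total != 0:
--         return -1
--     if any(ai < 0 or ai > 31 for ai in a):
--         return -1
--     # x makes some ai ^ x land in 28..31 exactly when x is in this forbidden set
--     forbidden = {ai ^ y for ai in a for y in (28, 29, 30, 31)}
--     for x in range(28):
--         if x not in forbidden:
--             return x
--     return -1
-- ===== Notes on version B (the rewrite author's own statement) =====
-- stated objective: faster
-- what changed: B eliminates A's 28-candidate brute force with per-candidate re-accumulation: it computes the total xor once, derives the single possible candidate (x = total) when the length is odd, and when the length is even reduces the problem to total == 0 plus one forbidden set {ai ^ y for y in 28..31} built in a single pass, after which each candidate is answered by an O(1) set lookup.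
import Mathlib
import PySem

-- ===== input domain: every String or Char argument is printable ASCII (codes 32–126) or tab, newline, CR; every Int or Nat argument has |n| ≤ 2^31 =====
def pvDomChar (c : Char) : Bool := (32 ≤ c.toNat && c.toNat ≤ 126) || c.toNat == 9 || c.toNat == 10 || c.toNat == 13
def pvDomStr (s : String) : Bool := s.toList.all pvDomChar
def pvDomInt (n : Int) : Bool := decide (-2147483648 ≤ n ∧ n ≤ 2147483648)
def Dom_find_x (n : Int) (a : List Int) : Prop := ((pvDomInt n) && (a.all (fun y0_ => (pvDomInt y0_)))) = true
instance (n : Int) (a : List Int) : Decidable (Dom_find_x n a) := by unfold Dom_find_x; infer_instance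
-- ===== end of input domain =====

-- B replaces A's candidate scan with inner re-accumulation by a direct derivation: the total xor
-- pins the unique candidate when the length is odd, and when it is even a forbidden set built once
-- from the array answers each candidate in O(1) (alternative algorithm).

-- ===== PORT A =====
-- inner for-loop over b: none = a 'break' occurred, some xor_sum = the loop ran to completion (Python's for/else)
def pvInnerA : List Int → Int → Option Int
  | [], acc => some acc
  | b_i :: rest, acc =>
    if b_i < 0 ∨ b_i > 27 then none else pvInnerA rest (PySem.Int.bxor acc b_i)

-- outer for-loop over the remaining candidates x
def pvLoopA (a : List Int) : List Int → Int
  | [] => -1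
  | x :: xs =>
    let b := a.map (fun a_i => PySem.Int.bxor a_i x)
    match pvInnerA b 0 with
    | some xor_sum => if xor_sum = 0 then x else pvLoopA a xs
    | none => pvLoopA a xs

def find_x (n : Int) (a : List Int) : Int :=
  pvLoopA a (PySem.List.pyRange 0 28 1)

-- ===== PORT B =====
-- {ai ^ y for ai in a for y in (28, 29, 30, 31)}
def pvForbidden (a : List Int) : PySem.Set Int :=
  PySem.Set.ofList (a.flatMap (fun ai =>
    [PySem.Int.bxor ai 28, PySem.Int.bxor ai 29, PySem.Int.bxor ai 30, PySem.Int.bxor ai 31]))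

-- for x in range(28): if x not in forbidden: return x / return -1
def pvScanB (fb : PySem.Set Int) : List Int → Int
  | [] => -1
  | x :: xs => if PySem.Set.contains fb x then pvScanB fb xs else x

def find_x_alt (n : Int) (a : List Int) : Int :=
  let total := a.foldl (fun s ai => PySem.Int.bxor s ai) 0
  if PySem.Int.mod (Int.ofNat a.length) 2 = 1 then
    let x := total
    if (decide (0 ≤ x) && decide (x ≤ 27))
        && a.all (fun ai => decide (0 ≤ PySem.Int.bxor ai x) && decide (PySem.Int.bxor ai x ≤ 27)) then x
    else -1
  else if total ≠ 0 then -1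
  else if a.any (fun ai => decide (ai < 0) || decide (ai > 31)) then -1
  else pvScanB (pvForbidden a) (PySem.List.pyRange 0 28 1)

-- ===== PRECONDITION & SPEC =====
def Spec_find_x (n : Int) (a : List Int) (out : Int) : Prop := out = find_x_alt n a
instance (n : Int) (a : List Int) (out : Int) : Decidable (Spec_find_x n a out) := by unfold Spec_find_x; infer_instance

-- ===== CLAIM =====
def Claim_equal_find_x : Prop := ∀ (n : Int) (a : List Int), Dom_find_x n a → Spec_find_x n a (find_x n a)

-- ===== LEMMAS AND PROOFS =====

-- sign/magnitude view of an Int, under which bxor acts componentwise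
def pvSb (a : Int) : Bool × Nat := (decide (a < 0), if 0 ≤ a then a.toNat else (-a-1).toNat)
def pvUnsb : Bool × Nat → Int
  | (false, n) => (n : Int)
  | (true, n) => -(n : Int) - 1

theorem pvSb_unsb (p : Bool × Nat) : pvSb (pvUnsb p) = p := by
  obtain ⟨s, n⟩ := p
  cases s <;> simp [pvUnsb, pvSb] <;> omega

theorem bxor_sb (a b : Int) :
    PySem.Int.bxor a b = pvUnsb ((pvSb a).1.xor (pvSb b).1, (pvSb a).2 ^^^ (pvSb b).2) := by
  unfold PySem.Int.bxor pvSb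
  by_cases ha : 0 ≤ a <;> by_cases hb : 0 ≤ b
  · simp [ha, hb, show ¬ a < 0 by omega, show ¬ b < 0 by omega, pvUnsb]
  · simp [ha, hb, show ¬ a < 0 by omega, show b < 0 by omega, pvUnsb]
  · simp [ha, hb, show a < 0 by omega, show ¬ b < 0 by omega, pvUnsb]
  · simp [ha, hb, show a < 0 by omega, show b < 0 by omega, pvUnsb]

theorem bxor_assoc (a b c : Int) :
    PySem.Int.bxor (PySem.Int.bxor a b) c = PySem.Int.bxor a (PySem.Int.bxor b c) := by
  rw [bxor_sb a b, bxor_sb b c, bxor_sb, bxor_sb, pvSb_unsb, pvSb_unsb]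
  simp [Nat.xor_assoc]

theorem bxor_neg_nonneg (a x : Int) (ha : a < 0) (hx : 0 ≤ x) : PySem.Int.bxor a x < 0 := by
  rw [bxor_sb]
  simp [pvSb, show a < 0 from ha, show ¬ x < 0 by omega, pvUnsb]
  omega

theorem bxor_eq_zero_iff (t x : Int) : PySem.Int.bxor t x = 0 ↔ x = t := by
  constructor
  · intro h
    have h2 : PySem.Int.bxor t (PySem.Int.bxor t x) = PySem.Int.bxor t 0 := by rw [h]
    rw [← bxor_assoc, PySem.Int.bxor_self, PySem.Int.bxor_comm, PySem.Int.bxor_zero,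
      PySem.Int.bxor_zero] at h2
    exact h2
  · intro h; simp [h]

-- the inner loop of A completes iff every element is in range, and then yields the xor-fold
theorem pvInnerA_eq (b : List Int) (acc : Int) :
    pvInnerA b acc =
      if b.all (fun y => decide (0 ≤ y) && decide (y ≤ 27)) then
        some (b.foldl (fun s y => PySem.Int.bxor s y) acc)
      else none := by
  induction b generalizing acc with
  | nil => simp [pvInnerA]
  | cons h t ih =>
    simp only [pvInnerA, List.all_cons, List.foldl_cons]
    by_cases h1 : h < 0 ∨ h > 27
    · have h2 : (decide (0 ≤ h) && decide (h ≤ 27)) = false := by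
        cases hd : decide (0 ≤ h) <;> cases he : decide (h ≤ 27) <;> simp_all <;> omega
      simp [h1, h2]
    · push_neg at h1
      simp [h1, ih]

-- bxor pulls out of the fold's accumulator
theorem foldl_bxor_acc (b : List Int) (acc x : Int) :
    b.foldl (fun s y => PySem.Int.bxor s y) (PySem.Int.bxor acc x) =
      PySem.Int.bxor (b.foldl (fun s y => PySem.Int.bxor s y) acc) x := by
  induction b generalizing acc with
  | nil => simp
  | cons h t ih =>
    simp only [List.foldl_cons]
    rw [show PySem.Int.bxor (PySem.Int.bxor acc x) h = PySem.Int.bxor (PySem.Int.bxor acc h) x by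
      rw [bxor_assoc, bxor_assoc, PySem.Int.bxor_comm x h], ih]

-- closed form: xor of (a_i ^ x) = (xor of a_i) ^ (x if |a| odd else 0)
theorem foldl_bxor_map (a : List Int) (x acc : Int) :
    (a.map (fun a_i => PySem.Int.bxor a_i x)).foldl (fun s y => PySem.Int.bxor s y) acc =
      PySem.Int.bxor (a.foldl (fun s y => PySem.Int.bxor s y) acc)
        (if a.length % 2 = 1 then x else 0) := by
  induction a generalizing acc with
  | nil => simp
  | cons h t ih =>
    simp only [List.map_cons, List.foldl_cons, List.length_cons]
    rw [show PySem.Int.bxor acc (PySem.Int.bxor h x) = PySem.Int.bxor (PySem.Int.bxor acc h) x by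
      rw [bxor_assoc]]
    rw [foldl_bxor_acc, ih]
    rcases Nat.even_or_odd t.length with he | ho
    · have h1 : t.length % 2 = 0 := Nat.even_iff.mp he
      have h2 : (t.length + 1) % 2 = 1 := by omega
      simp [h1, h2]
    · have h1 : t.length % 2 = 1 := Nat.odd_iff.mp ho
      have h2 : (t.length + 1) % 2 = 0 := by omega
      simp [h1, h2, bxor_assoc]

-- abbreviation used only in the proofs: A's per-candidate range check
def pvRangeOk (a : List Int) (x : Int) : Bool :=
  a.all (fun ai => decide (0 ≤ PySem.Int.bxor ai x) && decide (PySem.Int.bxor ai x ≤ 27))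

theorem all_map_range (a : List Int) (x : Int) :
    ((a.map (fun a_i => PySem.Int.bxor a_i x)).all (fun y => decide (0 ≤ y) && decide (y ≤ 27))) =
      pvRangeOk a x := by
  rw [List.all_map]; rfl

-- A's outer step, with the inner loop replaced by its characterisation
theorem pvLoopA_cons (a : List Int) (x : Int) (xs : List Int) :
    pvLoopA a (x :: xs) =
      if pvRangeOk a x = true ∧
          PySem.Int.bxor (a.foldl (fun s y => PySem.Int.bxor s y) 0)
            (if a.length % 2 = 1 then x else 0) = 0 then x
      else pvLoopA a xs := by
  simp only [pvLoopA, pvInnerA_eq, all_map_range, foldl_bxor_map]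
  by_cases h : pvRangeOk a x = true
  · simp [h]
  · simp [h]

theorem pyRange28 :
    PySem.List.pyRange 0 28 1 =
      [0,1,2,3,4,5,6,7,8,9,10,11,12,13,14,15,16,17,18,19,20,21,22,23,24,25,26,27] := by decide

-- ODD length: the only candidate passing the xor test is x = total
theorem loopA_odd (a : List Int) (hodd : a.length % 2 = 1) (t : Int)
    (ht : a.foldl (fun s y => PySem.Int.bxor s y) 0 = t) (xs : List Int) :
    pvLoopA a xs = if t ∈ xs ∧ pvRangeOk a t = true then t else -1 := by
  induction xs with
  | nil => simp [pvLoopA]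
  | cons x rest ih =>
    rw [pvLoopA_cons]
    have hc : (pvRangeOk a x = true ∧
        PySem.Int.bxor (a.foldl (fun s y => PySem.Int.bxor s y) 0)
          (if a.length % 2 = 1 then x else 0) = 0) ↔ (x = t ∧ pvRangeOk a t = true) := by
      rw [if_pos hodd, ht, bxor_eq_zero_iff]
      constructor
      · rintro ⟨h1, h2⟩; exact ⟨h2, h2 ▸ h1⟩
      · rintro ⟨h1, h2⟩; exact ⟨h1 ▸ h2, h1⟩
    by_cases hx : x = t ∧ pvRangeOk a t = true
    · rw [if_pos (hc.mpr hx), if_pos ⟨List.mem_cons.mpr (Or.inl hx.1.symm), hx.2⟩, hx.1]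
    · rw [if_neg (fun h => hx (hc.mp h)), ih]
      by_cases hr : pvRangeOk a t = true
      · have hxt : ¬ x = t := fun h => hx ⟨h, hr⟩
        by_cases hm : t ∈ rest
        · rw [if_pos ⟨hm, hr⟩, if_pos ⟨List.mem_cons_of_mem _ hm, hr⟩]
        · rw [if_neg (fun h => hm h.1), if_neg (fun h => by
            rcases List.mem_cons.mp h.1 with h1 | h1
            · exact hxt h1.symm
            · exact hm h1)]
      · rw [if_neg (fun h => hr h.2), if_neg (fun h => hr h.2)]

-- EVEN length, total ≠ 0: every candidate fails the xor test
theorem loopA_even_ne (a : List Int) (heven : a.length % 2 ≠ 1)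
    (hne : a.foldl (fun s y => PySem.Int.bxor s y) 0 ≠ 0) (xs : List Int) :
    pvLoopA a xs = -1 := by
  induction xs with
  | nil => rfl
  | cons x rest ih =>
    rw [pvLoopA_cons, if_neg, ih]
    rw [if_neg heven]
    intro h
    exact hne (by simpa using h.2)

-- a candidate scan whose per-element conditions agree is the same scan
theorem loopA_eq_scanB (a : List Int) (fb : PySem.Set Int) (xs : List Int)
    (h : ∀ x ∈ xs,
      (pvRangeOk a x = true ∧
        PySem.Int.bxor (a.foldl (fun s y => PySem.Int.bxor s y) 0)
          (if a.length % 2 = 1 then x else 0) = 0) ↔ PySem.Set.contains fb x = false) :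
    pvLoopA a xs = pvScanB fb xs := by
  induction xs with
  | nil => rfl
  | cons x rest ih =>
    rw [pvLoopA_cons, pvScanB]
    have hx := h x (List.mem_cons_self ..)
    by_cases hc : PySem.Set.contains fb x = true
    · rw [if_neg (by intro hh; rw [hx.mp hh] at hc; exact Bool.false_ne_true hc), if_pos hc]
      exact ih (fun y hy => h y (List.mem_cons_of_mem _ hy))
    · rw [if_pos (hx.mpr (Bool.eq_false_iff.mpr hc)), if_neg hc]

-- every candidate fails the range test
theorem loopA_allfail (a : List Int) (xs : List Int)
    (h : ∀ x ∈ xs, pvRangeOk a x = false) : pvLoopA a xs = -1 := by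
  induction xs with
  | nil => rfl
  | cons x rest ih =>
    rw [pvLoopA_cons, if_neg, ih (fun y hy => h y (List.mem_cons_of_mem _ hy))]
    rintro ⟨hok, -⟩
    rw [h x (List.mem_cons_self ..)] at hok
    exact Bool.false_ne_true hok

-- out-of-range element kills every candidate x ∈ [0, 27]
theorem rangeOk_out (a : List Int) (ai : Int) (hai : ai ∈ a) (hout : ai < 0 ∨ ai > 31)
    (x : Int) (hx0 : 0 ≤ x) (hx : x ≤ 27) : pvRangeOk a x = false := by
  rw [pvRangeOk, List.all_eq_false]
  refine ⟨ai, hai, ?_⟩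
  have hkey : ¬ (0 ≤ PySem.Int.bxor ai x ∧ PySem.Int.bxor ai x ≤ 27) := by
    rcases hout with hneg | hbig
    · have := bxor_neg_nonneg ai x hneg hx0
      omega
    · rintro ⟨h0, h27⟩
      have hpos : (0:Int) ≤ ai := by omega
      rw [PySem.Int.bxor_of_nonneg hpos hx0] at h0 h27
      have h32 : (2:Nat)^5 = 32 := by norm_num
      have hxlt : x.toNat < 2^5 := by omega
      have hrlt : ai.toNat ^^^ x.toNat < 2^5 := by omega
      have hlt := Nat.xor_lt_two_pow hrlt hxlt
      rw [Nat.xor_xor_cancel_right] at hlt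
      omega
  simpa using hkey

-- in-range element: the range test on x is exactly "x avoids ai ^ 28 .. ai ^ 31"
theorem rangeOk_elem (ai : Int) (h0 : 0 ≤ ai) (h31 : ai ≤ 31)
    (x : Int) (hx0 : 0 ≤ x) (hx : x ≤ 27) :
    (0 ≤ PySem.Int.bxor ai x ∧ PySem.Int.bxor ai x ≤ 27) ↔
      ¬ (x = PySem.Int.bxor ai 28 ∨ x = PySem.Int.bxor ai 29 ∨
         x = PySem.Int.bxor ai 30 ∨ x = PySem.Int.bxor ai 31) := by
  rw [PySem.Int.bxor_of_nonneg h0 hx0,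
      PySem.Int.bxor_of_nonneg h0 (by norm_num : (0:Int) ≤ 28),
      PySem.Int.bxor_of_nonneg h0 (by norm_num : (0:Int) ≤ 29),
      PySem.Int.bxor_of_nonneg h0 (by norm_num : (0:Int) ≤ 30),
      PySem.Int.bxor_of_nonneg h0 (by norm_num : (0:Int) ≤ 31)]
  simp only [show ((28:Int).toNat) = 28 from rfl, show ((29:Int).toNat) = 29 from rfl,
    show ((30:Int).toNat) = 30 from rfl, show ((31:Int).toNat) = 31 from rfl]
  have h32 : (2:Nat)^5 = 32 := by norm_num
  have hlt : ai.toNat ^^^ x.toNat < 32 := by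
    have := Nat.xor_lt_two_pow (show ai.toNat < 2^5 by omega) (show x.toNat < 2^5 by omega)
    omega
  have key : ∀ y : Nat, x.toNat = ai.toNat ^^^ y ↔ ai.toNat ^^^ x.toNat = y := by
    intro y
    constructor
    · intro h; rw [h, Nat.xor_xor_cancel_left]
    · intro h; rw [← h, Nat.xor_xor_cancel_left]
  have e : ∀ y : Nat, (x = ((ai.toNat ^^^ y : Nat) : Int)) ↔ ai.toNat ^^^ x.toNat = y := by
    intro y
    rw [← key y]
    omega
  rw [e 28, e 29, e 30, e 31]
  omega

-- membership in B's forbidden set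
theorem mem_forbidden (a : List Int) (x : Int) :
    PySem.Set.contains (pvForbidden a) x = true ↔
      ∃ ai ∈ a, x = PySem.Int.bxor ai 28 ∨ x = PySem.Int.bxor ai 29 ∨
        x = PySem.Int.bxor ai 30 ∨ x = PySem.Int.bxor ai 31 := by
  rw [PySem.Set.contains_iff, pvForbidden, PySem.Set.mem_ofList, List.mem_flatMap]
  constructor
  · rintro ⟨ai, hai, hm⟩
    exact ⟨ai, hai, by simpa using hm⟩
  · rintro ⟨ai, hai, hm⟩
    exact ⟨ai, hai, by simpa using hm⟩

-- all elements in [0, 31]: range test ↔ not forbidden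
theorem rangeOk_iff_not_forbidden (a : List Int)
    (hall : ∀ ai ∈ a, 0 ≤ ai ∧ ai ≤ 31) (x : Int) (hx0 : 0 ≤ x) (hx : x ≤ 27) :
    pvRangeOk a x = true ↔ PySem.Set.contains (pvForbidden a) x = false := by
  rw [pvRangeOk, List.all_eq_true, Bool.eq_false_iff, Ne, mem_forbidden]
  constructor
  · intro h hcon
    obtain ⟨ai, hai, hm⟩ := hcon
    have := h ai hai
    simp only [Bool.and_eq_true, decide_eq_true_eq] at this
    exact (rangeOk_elem ai (hall ai hai).1 (hall ai hai).2 x hx0 hx).mp this hm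
  · intro h ai hai
    simp only [Bool.and_eq_true, decide_eq_true_eq]
    exact (rangeOk_elem ai (hall ai hai).1 (hall ai hai).2 x hx0 hx).mpr
      (fun hm => h ⟨ai, hai, hm⟩)

theorem parity_iff (a : List Int) :
    PySem.Int.mod (Int.ofNat a.length) 2 = 1 ↔ a.length % 2 = 1 := by
  simp [PySem.Int.mod, Int.fmod_eq_emod]
  omega

theorem mem_range28 (x : Int) :
    x ∈ ([0,1,2,3,4,5,6,7,8,9,10,11,12,13,14,15,16,17,18,19,20,21,22,23,24,25,26,27] : List Int)
      ↔ 0 ≤ x ∧ x ≤ 27 := by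
  simp only [List.mem_cons, List.not_mem_nil, or_false]
  omega

-- ===== VERDICT =====
theorem find_x_spec : Claim_equal_find_x := by
  intro n a _
  unfold Spec_find_x find_x find_x_alt
  simp only
  by_cases hodd : a.length % 2 = 1
  · rw [if_pos ((parity_iff a).mpr hodd),
      loopA_odd a hodd (a.foldl (fun s y => PySem.Int.bxor s y) 0) rfl, pyRange28]
    by_cases hr : (0 ≤ a.foldl (fun s y => PySem.Int.bxor s y) 0 ∧
        a.foldl (fun s y => PySem.Int.bxor s y) 0 ≤ 27)
    · by_cases hok : pvRangeOk a (a.foldl (fun s y => PySem.Int.bxor s y) 0) = true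
      · rw [if_pos ⟨(mem_range28 _).mpr hr, hok⟩, if_pos]
        rw [Bool.and_eq_true, Bool.and_eq_true]
        exact ⟨⟨decide_eq_true hr.1, decide_eq_true hr.2⟩, hok⟩
      · rw [if_neg (fun h => hok h.2), if_neg]
        rw [Bool.and_eq_true]
        rintro ⟨-, hcon⟩
        exact hok hcon
    · rw [if_neg (fun h => hr ((mem_range28 _).mp h.1)), if_neg]
      rw [Bool.and_eq_true, Bool.and_eq_true]
      rintro ⟨⟨h1, h2⟩, -⟩
      exact hr ⟨of_decide_eq_true h1, of_decide_eq_true h2⟩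
  · rw [if_neg (fun h => hodd ((parity_iff a).mp h))]
    by_cases hz : a.foldl (fun s y => PySem.Int.bxor s y) 0 = 0
    · rw [if_neg (by simpa using hz)]
      by_cases hout : a.any (fun ai => decide (ai < 0) || decide (ai > 31)) = true
      · rw [if_pos hout]
        obtain ⟨ai, hai, hcond⟩ := List.any_eq_true.mp hout
        simp only [Bool.or_eq_true, decide_eq_true_eq] at hcond
        rw [pyRange28]
        apply loopA_allfail
        intro x hx
        have hxb := (mem_range28 x).mp hx
        exact rangeOk_out a ai hai hcond x hxb.1 hxb.2
      · rw [if_neg hout]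
        have hall : ∀ ai ∈ a, 0 ≤ ai ∧ ai ≤ 31 := by
          intro ai hai
          rw [List.any_eq_true] at hout
          have h1 : ¬ ((decide (ai < 0) || decide (ai > 31)) = true) :=
            fun hc => hout ⟨ai, hai, hc⟩
          simp only [Bool.or_eq_true, decide_eq_true_eq, not_or] at h1
          omega
        apply loopA_eq_scanB
        intro x hx
        rw [pyRange28] at hx
        have hxb := (mem_range28 x).mp hx
        rw [if_neg hodd, hz]
        constructor
        · rintro ⟨hok, -⟩
          exact (rangeOk_iff_not_forbidden a hall x hxb.1 hxb.2).mp hok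
        · intro hnf
          exact ⟨(rangeOk_iff_not_forbidden a hall x hxb.1 hxb.2).mpr hnf, by
            rw [PySem.Int.bxor_comm, PySem.Int.bxor_zero]⟩
    · rw [if_pos (by simpa using hz)]
      exact loopA_even_ne a hodd hz _
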